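-- pv_equiv track=rewrite | github.com/Grzetan/mineswapper | utils.py | get_cells_around
-- ===== SOURCE A (Python) =====
-- def get_cells_around(cell,board_size):
--         fields_to_check = [(-1,-1), (0,-1),(1,-1)
--                           ,(-1,0), (1,0)
--                           ,(-1,1), (0,1), (1,1)]
--         cells_around = []
--         for field in fields_to_check:
--             x = cell[0]+field[0]
--             y = cell[1]+field[1]
--             if x < 0 or y < 0 or x > board_size[0]-1 or y > board_size[1]-1:
--                 continue
--             cells_around.append((x,y))
--
--         return cells_around
-- ===== SOURCE B (Python) =====
-- def get_cells_around(cell, board_size):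
--     xs = range(max(0, cell[0] - 1), min(board_size[0] - 1, cell[0] + 1) + 1)
--     ys = range(max(0, cell[1] - 1), min(board_size[1] - 1, cell[1] + 1) + 1)
--     cells_around = []
--     for y in ys:
--         for x in xs:
--             if (x, y) != (cell[0], cell[1]):
--                 cells_around.append((x, y))
--     return cells_around
-- ===== Notes on version B (the rewrite author's own statement) =====
-- stated objective: simpler
-- what changed: B precomputes the clamped in-bounds x/y ranges and enumerates their product (skipping the center cell) instead of generating all 8 offsets and bounds-checking each one.
import Mathlib
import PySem

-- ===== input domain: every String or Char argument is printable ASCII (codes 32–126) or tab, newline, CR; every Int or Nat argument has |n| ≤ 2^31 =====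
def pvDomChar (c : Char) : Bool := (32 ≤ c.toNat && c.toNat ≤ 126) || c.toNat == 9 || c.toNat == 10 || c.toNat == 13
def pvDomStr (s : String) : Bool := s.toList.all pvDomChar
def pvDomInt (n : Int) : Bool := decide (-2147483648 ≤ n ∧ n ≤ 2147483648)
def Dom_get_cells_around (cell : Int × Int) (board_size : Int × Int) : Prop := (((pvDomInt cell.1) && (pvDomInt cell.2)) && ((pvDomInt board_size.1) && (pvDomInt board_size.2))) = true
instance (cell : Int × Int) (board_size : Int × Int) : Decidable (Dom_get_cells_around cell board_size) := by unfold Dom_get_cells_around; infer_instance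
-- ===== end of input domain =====

-- B replaces A's generate-8-offsets-and-filter with clamped in-bounds ranges enumerated directly (simpler; same cost).

-- ===== PORT A =====
def get_cells_around (cell : Int × Int) (board_size : Int × Int) : List (Int × Int) :=
  let fields_to_check : List (Int × Int) :=
    [(-1,-1), (0,-1), (1,-1), (-1,0), (1,0), (-1,1), (0,1), (1,1)]
  fields_to_check.foldl (fun cells_around field =>
    let x := cell.1 + field.1
    let y := cell.2 + field.2
    if x < 0 ∨ y < 0 ∨ x > board_size.1 - 1 ∨ y > board_size.2 - 1 then
      cells_around
    else
      cells_around ++ [(x, y)]) []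

-- ===== PORT B =====
def get_cells_around_alt (cell : Int × Int) (board_size : Int × Int) : List (Int × Int) :=
  let xs := PySem.List.pyRange (max 0 (cell.1 - 1)) (min (board_size.1 - 1) (cell.1 + 1) + 1) 1
  let ys := PySem.List.pyRange (max 0 (cell.2 - 1)) (min (board_size.2 - 1) (cell.2 + 1) + 1) 1
  ys.foldl (fun cells_around y =>
    xs.foldl (fun cells_around x =>
      if (x, y) ≠ (cell.1, cell.2) then cells_around ++ [(x, y)] else cells_around)
      cells_around) []

-- ===== PRECONDITION & SPEC =====
def Spec_get_cells_around (cell : Int × Int) (board_size : Int × Int) (out : List (Int × Int)) : Prop := out = get_cells_around_alt cell board_size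
instance (cell : Int × Int) (board_size : Int × Int) (out : List (Int × Int)) : Decidable (Spec_get_cells_around cell board_size out) := by unfold Spec_get_cells_around; infer_instance

-- ===== CLAIM (what is proved, stated in full; the proofs are below) =====
def Claim_equal_get_cells_around : Prop := ∀ (cell : Int × Int) (board_size : Int × Int), Dom_get_cells_around cell board_size → Spec_get_cells_around cell board_size (get_cells_around cell board_size)

-- ===== LEMMAS AND PROOFS =====

-- row-major (y first, then x) strict order on cells; both outputs are sorted by it
def pvLex (p q : Int × Int) : Prop := p.2 < q.2 ∨ (p.2 = q.2 ∧ p.1 < q.1)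

theorem pvLex_irrefl (p : Int × Int) : ¬ pvLex p p := by
  simp [pvLex]

-- two lists sorted by the strict order pvLex with the same members are equal
theorem eq_of_pvLex_of_mem {l1 l2 : List (Int × Int)}
    (p1 : l1.Pairwise pvLex) (p2 : l2.Pairwise pvLex)
    (hm : ∀ z, z ∈ l1 ↔ z ∈ l2) : l1 = l2 := by
  have n1 : l1.Nodup := p1.imp (fun h => by rintro rfl; exact pvLex_irrefl _ h)
  have n2 : l2.Nodup := p2.imp (fun h => by rintro rfl; exact pvLex_irrefl _ h)
  refine List.eq_of_perm_of_sorted ?_ p1 p2 ((List.perm_ext_iff_of_nodup n1 n2).mpr hm)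
  intro a b _ _ hab hba
  exact absurd hba (by rcases hab with h | ⟨h, h'⟩ <;> simp [pvLex] <;> omega)

-- 'if cond: continue / out.append(f(x))' loop body as filter + map
theorem foldl_skip_append {α β : Type} (p : α → Prop) [DecidablePred p] (f : α → β)
    (l : List α) (acc : List β) :
    l.foldl (fun acc x => if p x then acc else acc ++ [f x]) acc
      = acc ++ (l.filter (fun x => !decide (p x))).map f := by
  induction l generalizing acc with
  | nil => simp
  | cons a t ih => by_cases h : p a <;> simp [h, ih]

theorem A_form (cell board_size : Int × Int) :
    get_cells_around cell board_size
      = (([(-1,-1), (0,-1), (1,-1), (-1,0), (1,0), (-1,1), (0,1), (1,1)] : List (Int × Int)).filter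
          (fun field => !decide (cell.1 + field.1 < 0 ∨ cell.2 + field.2 < 0 ∨
              cell.1 + field.1 > board_size.1 - 1 ∨ cell.2 + field.2 > board_size.2 - 1))).map
          (fun field => (cell.1 + field.1, cell.2 + field.2)) := by
  simp only [get_cells_around]
  simpa using foldl_skip_append
      (fun field : Int × Int => cell.1 + field.1 < 0 ∨ cell.2 + field.2 < 0 ∨
        cell.1 + field.1 > board_size.1 - 1 ∨ cell.2 + field.2 > board_size.2 - 1)
      (fun field => (cell.1 + field.1, cell.2 + field.2))
      [(-1,-1), (0,-1), (1,-1), (-1,0), (1,0), (-1,1), (0,1), (1,1)] []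

theorem B_form (cell board_size : Int × Int) :
    get_cells_around_alt cell board_size
      = (PySem.List.pyRange (max 0 (cell.2 - 1)) (min (board_size.2 - 1) (cell.2 + 1) + 1) 1).flatMap
          (fun y => ((PySem.List.pyRange (max 0 (cell.1 - 1)) (min (board_size.1 - 1) (cell.1 + 1) + 1) 1).filter
              (fun x => decide ((x, y) ≠ (cell.1, cell.2)))).map (fun x => (x, y))) := by
  simp only [get_cells_around_alt]
  simp only [PySem.List.foldl_append_ite]
  rw [PySem.List.foldl_append_eq_flatMap]
  simp

theorem get_cells_around_eq (cell board_size : Int × Int) :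
    get_cells_around cell board_size = get_cells_around_alt cell board_size := by
  rw [A_form, B_form]
  apply eq_of_pvLex_of_mem
  · rw [List.pairwise_map]
    apply List.Pairwise.filter
    simp [List.pairwise_cons, pvLex]
  · rw [List.pairwise_flatMap]
    constructor
    · intro y _
      rw [List.pairwise_map]
      apply List.Pairwise.filter
      exact (PySem.List.pairwise_lt_pyRange_one _ _).imp (fun h => Or.inr ⟨rfl, h⟩)
    · refine (PySem.List.pairwise_lt_pyRange_one _ _).imp ?_
      intro y1 y2 h z1 hz1 z2 hz2
      rcases List.mem_map.mp hz1 with ⟨x1, _, rfl⟩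
      rcases List.mem_map.mp hz2 with ⟨x2, _, rfl⟩
      exact Or.inl h
  · rintro ⟨zx, zy⟩
    simp [List.mem_filter, PySem.List.mem_pyRange_one, Prod.ext_iff]
    constructor
    · rintro ⟨a, b, ⟨hab, hb⟩, hx, hy⟩; omega
    · intro h; exact ⟨zx - cell.1, zy - cell.2, ⟨by omega, by omega⟩, by omega, by omega⟩

-- ===== VERDICT (by name: the statement is the Claim_ definition above) =====
theorem get_cells_around_spec : Claim_equal_get_cells_around := by
  intro cell board_size _
  exact get_cells_around_eq cell board_size
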